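-- pv_equiv track=rewrite | github.com/jakobnunnendorf/Yale-NUS | General_Chemistry/thermodynamics.py | parse_reaction
-- ===== SOURCE A (Python) =====
-- def parse_reaction(reaction):
--     reactants, products = reaction.split("->")
--     reactants = reactants.split("+")
--     products = products.split("+")
--
--     def parse_species(species_list):
--         parsed_species = []
--         for species in species_list:
--             species = species.strip()
--             coeff = 1
--             compound = species
--             if species[0].isdigit():
--                 for i, char in enumerate(species):
--                     if not char.isdigit():
--                         coeff = int(species[:i])
--                         compound = species[i:]
--                         break
--             parsed_species.append((coeff, compound))
--         return parsed_species
--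
--     reactants = parse_species(reactants)
--     products = parse_species(products)
--
--     return reactants, products
-- ===== SOURCE B (Python) =====
-- def parse_reaction(reaction):
--     # single left-to-right character scan: tokenise into sides/species in one pass
--     # (no split calls), instead of A's nested split("->") / split("+") passes
--     sides, tok = [[]], []
--     i, n = 0, len(reaction)
--     while i < n:
--         c = reaction[i]
--         if c == '-' and i + 1 < n and reaction[i + 1] == '>':
--             sides[-1].append(''.join(tok))
--             sides.append([])
--             tok = []
--             i += 2
--         elif c == '+':
--             sides[-1].append(''.join(tok))
--             tok = []
--             i += 1
--         else:
--             tok.append(c)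
--             i += 1
--     sides[-1].append(''.join(tok))
--     if len(sides) != 2:
--         raise ValueError("expected exactly one '->'")
--
--     def species(token):
--         s = token.strip()
--         j = 0
--         while j < len(s) and '0' <= s[j] <= '9':
--             j += 1
--         return (int(s[:j]), s[j:]) if 0 < j < len(s) else (1, s)
--
--     return [species(t) for t in sides[0]], [species(t) for t in sides[1]]
-- ===== Notes on version B (the rewrite author's own statement) =====
-- stated objective: alternative
-- what changed: Replaces A's nested split('->')/split('+') passes plus first-char-digit guard with enumerate-and-break by a single left-to-right character scan that tokenises both sides in one pass, and a plain while-loop that counts the leading digit run of each token.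
-- outside the precondition, e.g. on parse_reaction('->'): A raises IndexError, B returns ([(1, '')], [(1, '')]); on parse_reaction('a->b->c'): A raises ValueError, B raises ValueError; on parse_reaction('+'): A raises ValueError, B raises ValueError
import Mathlib
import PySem

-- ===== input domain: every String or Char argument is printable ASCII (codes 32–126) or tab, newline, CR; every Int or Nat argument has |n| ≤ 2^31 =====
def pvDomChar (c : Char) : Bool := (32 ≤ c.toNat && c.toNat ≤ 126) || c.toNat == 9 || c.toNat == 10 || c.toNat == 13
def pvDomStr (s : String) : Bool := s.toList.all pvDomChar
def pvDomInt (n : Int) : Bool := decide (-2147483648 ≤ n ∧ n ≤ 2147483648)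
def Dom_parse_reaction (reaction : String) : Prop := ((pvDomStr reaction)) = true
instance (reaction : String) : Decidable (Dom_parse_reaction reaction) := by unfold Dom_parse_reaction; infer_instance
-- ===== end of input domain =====

-- B replaces A's nested split("->") / split("+") passes and enumerate-with-break digit scan
-- by a single left-to-right character scan that tokenises both sides in one pass, plus a
-- while-loop counting each token's leading digit run (objective: alternative).

-- ===== PORT A =====
-- the inner "for i, char in enumerate(species): if not char.isdigit(): ...; break" loop,
-- ported as indexed structural recursion over the remaining characters
def pvScanA (s : List Char) (i : Nat) : List Char → Int × List Char
  | [] => (1, s)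
  | c :: rest =>
    if PySem.Chars.isdigit c = false then
      -- int(species[:i]) always succeeds here (nonempty all-digit prefix): getD 0 unreachable
      ((PySem.Int.ofChars? (PySem.List.slice s none (some (i : Int)))).getD 0,
       PySem.List.slice s (some (i : Int)) none)
    else pvScanA s (i + 1) rest

def pvSpeciesA (sp : List Char) : Int × String :=
  let s := PySem.Chars.strip sp
  match PySem.List.pyGet? s 0 with
  | none => (1, String.ofList s)   -- species[0] raises IndexError on empty species; excluded by Pre_
  | some c =>
    if PySem.Chars.isdigit c then
      let (coeff, compound) := pvScanA s 0 s
      (coeff, String.ofList compound)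
    else (1, String.ofList s)

def pvParseSpeciesA (l : List (List Char)) : List (Int × String) :=
  l.foldl (fun acc sp => acc ++ [pvSpeciesA sp]) []

def parse_reaction (reaction : String) : (List (Int × String)) × (List (Int × String)) :=
  let parts := PySem.Chars.splitOn reaction.toList ['-', '>']
  -- 'reactants, products = reaction.split("->")' raises ValueError unless exactly 2 parts; excluded by Pre_
  let reactants := (parts[0]?).getD []
  let products := (parts[1]?).getD []
  (pvParseSpeciesA (PySem.Chars.splitOn reactants ['+']),
   pvParseSpeciesA (PySem.Chars.splitOn products ['+']))

-- ===== PORT B =====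
-- Source B's single while-loop over the characters: an arrow "->" closes the current token and
-- opens a new side, '+' closes the current token, any other char extends it.  The Python
-- appends tokens at the back while scanning left to right; ported as the same left-to-right
-- scan with the per-char decisions in the same order, building the result on the recursive tail.
def pvTokB : List Char → List (List (List Char))
  | '-' :: '>' :: rest => [[]] :: pvTokB rest
  | '+' :: rest =>
    match pvTokB rest with
    | [] => [[[]]]                         -- unreachable: pvTokB never returns []
    | toks :: sides => ([] :: toks) :: sides
  | c :: rest =>
    match pvTokB rest with
    | (t :: ts) :: sides => ((c :: t) :: ts) :: sides
    | _ => [[[c]]]                         -- unreachable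
  | [] => [[[]]]

-- "j = 0; while j < len(s) and '0' <= s[j] <= '9': j += 1"
def pvRunB (j : Nat) : List Char → Nat
  | [] => j
  | c :: rest => if '0' ≤ c ∧ c ≤ '9' then pvRunB (j + 1) rest else j

def pvSpeciesB (tok : List Char) : Int × String :=
  let s := PySem.Chars.strip tok
  let j := pvRunB 0 s
  if 0 < j ∧ j < s.length then
    ((PySem.Int.ofChars? (PySem.List.slice s none (some (j : Int)))).getD 0,
     String.ofList (PySem.List.slice s (some (j : Int)) none))
  else (1, String.ofList s)

def parse_reaction_alt (reaction : String) : (List (Int × String)) × (List (Int × String)) :=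
  match pvTokB reaction.toList with
  | [r, p] => (r.map pvSpeciesB, p.map pvSpeciesB)
  | _ => ([], [])   -- "raise ValueError" when the scan found ≠ 2 sides; excluded by Pre_

-- ===== PRECONDITION & SPEC =====
-- Pre_ excludes exactly the inputs where A raises: a "->" count other than one (unpacking
-- ValueError) and any species that is empty after stripping (IndexError on species[0]).
def Pre_parse_reaction (reaction : String) : Prop :=
  (PySem.Chars.splitOn reaction.toList ['-', '>']).length = 2 ∧
  ∀ side ∈ PySem.Chars.splitOn reaction.toList ['-', '>'],
    ∀ sp ∈ PySem.Chars.splitOn side ['+'], PySem.Chars.strip sp ≠ []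
instance (reaction : String) : Decidable (Pre_parse_reaction reaction) := by
  unfold Pre_parse_reaction; infer_instance

def pvWitness_parse_reaction : String := "2H2 + O2 -> 2H2O"

def Spec_parse_reaction (reaction : String) (out : (List (Int × String)) × (List (Int × String))) : Prop := out = parse_reaction_alt reaction
instance (reaction : String) (out : (List (Int × String)) × (List (Int × String))) : Decidable (Spec_parse_reaction reaction out) := by unfold Spec_parse_reaction; infer_instance

-- ===== CLAIM (what is proved, stated in full; the proofs are below) =====
def Claim_equal_parse_reaction : Prop := ∀ (reaction : String), Dom_parse_reaction reaction → Pre_parse_reaction reaction → Spec_parse_reaction reaction (parse_reaction reaction)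

-- ===== LEMMAS AND PROOFS =====

-- recursion-friendly characterisation of Python's str.split(sep) for a fixed nonempty sep
def pvCons (cur : List Char) : List (List Char) → List (List Char)
  | [] => [cur]
  | t :: ts => (cur ++ t) :: ts

def pvSplit (sep : List Char) (hsep : sep ≠ []) : List Char → List (List Char)
  | [] => [[]]
  | c :: rest =>
    if sep.isPrefixOf (c :: rest) then
      [] :: pvSplit sep hsep ((c :: rest).drop sep.length)
    else
      pvCons [c] (pvSplit sep hsep rest)
termination_by l => l.length
decreasing_by
  · have : 0 < sep.length := List.length_pos_iff.mpr hsep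
    simp; omega
  · simp

theorem pvSplit_ne_nil (sep : List Char) (hsep : sep ≠ []) (l : List Char) :
    pvSplit sep hsep l ≠ [] := by
  fun_induction pvSplit sep hsep l with
  | case1 => simp
  | case2 => simp
  | case3 c rest h ih => cases pvSplit sep hsep rest <;> simp [pvCons]

theorem pvGo_spec (sep : List Char) (hsep : sep ≠ []) :
    ∀ (fuel : Nat) (l cur : List Char) (acc : List (List Char)), l.length < fuel →
      PySem.Chars.splitOn.go sep fuel l cur acc =
        acc.reverse ++ pvCons cur.reverse (pvSplit sep hsep l) := by
  intro fuel
  induction fuel with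
  | zero => intro l cur acc h; omega
  | succ fuel ih =>
    intro l cur acc h
    cases l with
    | nil =>
      rw [PySem.Chars.splitOn.go.eq_def]
      simp [pvSplit, pvCons]
    | cons c rest =>
      rw [PySem.Chars.splitOn.go.eq_def]
      simp only []
      by_cases hp : sep.isPrefixOf (c :: rest) = true
      · have hlen : ((c :: rest).drop sep.length).length < fuel := by
          have : 0 < sep.length := List.length_pos_iff.mpr hsep
          simp at h ⊢; omega
        rw [if_pos hp, ih _ [] _ hlen]
        conv_rhs => rw [pvSplit]
        rw [if_pos hp]
        rcases hps : pvSplit sep hsep ((c :: rest).drop sep.length) with _ | ⟨t, ts⟩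
        · exact absurd hps (pvSplit_ne_nil sep hsep _)
        · simp [pvCons]
      · have hlen : rest.length < fuel := by simp at h; omega
        rw [if_neg hp, ih rest (c :: cur) acc hlen]
        rw [pvSplit]
        rw [if_neg hp]
        cases hr : pvSplit sep hsep rest with
        | nil => exact absurd hr (pvSplit_ne_nil sep hsep rest)
        | cons t ts => simp [pvCons]

theorem splitOn_eq_pvSplit (sep : List Char) (hsep : sep ≠ []) (s : List Char) :
    PySem.Chars.splitOn s sep = pvSplit sep hsep s := by
  have h := pvGo_spec sep hsep (s.length + 1) s [] [] (by omega)
  rw [PySem.Chars.splitOn, h]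
  cases hs : pvSplit sep hsep s with
  | nil => exact absurd hs (pvSplit_ne_nil sep hsep s)
  | cons t ts => simp [pvCons]

theorem pvArrow_ne : (['-', '>'] : List Char) ≠ [] := by simp
theorem pvPlus_ne : (['+'] : List Char) ≠ [] := by simp

-- the one-pass tokeniser is the nested split: sides by "->", each side's tokens by "+"
theorem pvTokB_eq (cs : List Char) :
    pvTokB cs = (pvSplit ['-', '>'] pvArrow_ne cs).map (pvSplit ['+'] pvPlus_ne) := by
  fun_induction pvTokB cs with
  | case1 rest ih =>
    conv_rhs => rw [pvSplit]
    simp only [show (['-', '>'] : List Char).isPrefixOf ('-' :: '>' :: rest) = true by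
      simp [List.isPrefixOf], if_pos]
    simp only [List.length_cons, List.length_nil, List.drop_succ_cons, List.drop_zero,
      List.map_cons]
    rw [ih]
    simp [pvSplit]
  | case2 rest hx ih =>
    rw [ih] at hx
    rcases hn : pvSplit ['-', '>'] pvArrow_ne rest with _ | ⟨t, ts⟩
    · exact absurd hn (pvSplit_ne_nil _ _ rest)
    · rw [hn] at hx; simp at hx
  | case3 rest toks sides hx ih =>
    have hnp : (['-', '>'] : List Char).isPrefixOf ('+' :: rest) = false := by
      simp [List.isPrefixOf]
    conv_rhs => rw [pvSplit]
    rw [hnp]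
    simp only [Bool.false_eq_true, if_false]
    rcases hn : pvSplit ['-', '>'] pvArrow_ne rest with _ | ⟨t, ts⟩
    · exact absurd hn (pvSplit_ne_nil _ _ rest)
    · rw [ih, hn] at hx
      simp only [List.map_cons] at hx
      simp only [pvCons, List.map_cons]
      injection hx with hx1 hx2
      conv_rhs => rw [pvSplit.eq_def]
      simp only [show (['+'] : List Char).isPrefixOf ('+' :: t) = true by
        simp [List.isPrefixOf], if_pos, if_true, List.length_cons, List.length_nil,
        List.drop_succ_cons, List.drop_zero]
      rw [← hx1, ← hx2]
      simp [List.isPrefixOf]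
  | case4 c rest hne1 hne2 t ts sides hx ih =>
    have hnp : (['-', '>'] : List Char).isPrefixOf (c :: rest) = false := by
      rcases rest with _ | ⟨r, rr⟩
      · simp [List.isPrefixOf]
      · simp [List.isPrefixOf]
        intro h1 h2
        exact (hne1 rr h1.symm (by rw [h2])).elim
    have hcp : c ≠ '+' := fun h => hne2 h
    conv_rhs => rw [pvSplit]
    rw [hnp]
    simp only [Bool.false_eq_true, if_false]
    rcases hn : pvSplit ['-', '>'] pvArrow_ne rest with _ | ⟨t', ts'⟩
    · exact absurd hn (pvSplit_ne_nil _ _ rest)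
    · rw [ih, hn] at hx
      simp only [List.map_cons] at hx
      simp only [pvCons, List.map_cons]
      conv_rhs => rw [pvSplit.eq_def]
      have hcp2 : (['+'] : List Char).isPrefixOf (c :: t') = false := by
        simp [List.isPrefixOf]
        exact fun h => hcp h.symm
      simp only [List.singleton_append, hcp2, Bool.false_eq_true, if_false]
      rcases hu : pvSplit ['+'] pvPlus_ne t' with _ | ⟨u, us⟩
      · exact absurd hu (pvSplit_ne_nil _ _ t')
      · rw [hu] at hx
        injection hx with hx1 hx2
        injection hx1 with hx11 hx12
        simp only [pvCons]
        rw [hx11, hx12, hx2]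
        simp
  | case5 c rest hne1 hne2 hx ih =>
    exfalso
    rcases hn : pvSplit ['-', '>'] pvArrow_ne rest with _ | ⟨t', ts'⟩
    · exact absurd hn (pvSplit_ne_nil _ _ rest)
    · rcases hu : pvSplit ['+'] pvPlus_ne t' with _ | ⟨u, us⟩
      · exact absurd hu (pvSplit_ne_nil _ _ t')
      · exact hx u us (ts'.map (pvSplit ['+'] pvPlus_ne))
          (by rw [ih, hn]; simp [hu])
  | case6 => simp [pvSplit]

-- the two ports' digit tests agree: Python's ASCII isdigit is the '0'..'9' range
theorem pvDigit_eq : (fun c => decide ('0' ≤ c ∧ c ≤ '9')) = PySem.Chars.isdigit := by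
  funext c; simp [PySem.Chars.isdigit]

theorem pvRunB_eq (cs : List Char) (j : Nat) :
    pvRunB j cs = j + (cs.takeWhile PySem.Chars.isdigit).length := by
  induction cs generalizing j with
  | nil => simp [pvRunB]
  | cons c rest ih =>
    rw [pvRunB]
    by_cases hc : PySem.Chars.isdigit c = true
    · have : ('0' ≤ c ∧ c ≤ '9') := by
        have := congrFun pvDigit_eq c; simp [hc] at this; simpa using this
      rw [if_pos this, ih, List.takeWhile_cons_of_pos hc]
      simp; omega
    · have : ¬ ('0' ≤ c ∧ c ≤ '9') := by
        have := congrFun pvDigit_eq c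
        simp [Bool.eq_false_iff.mpr hc] at this; simpa using this
      rw [if_neg this, List.takeWhile_cons_of_neg (by simpa using hc)]
      simp
  
theorem pvScanA_eq (rest pre : List Char)
    (hall : ∀ c ∈ pre, PySem.Chars.isdigit c = true) (hpre : pre ≠ []) :
    pvScanA (pre ++ rest) pre.length rest =
      (let s := pre ++ rest
       let body := s.dropWhile PySem.Chars.isdigit
       let k := s.length - body.length
       if 0 < k ∧ k < s.length then
         ((PySem.Int.ofChars? (PySem.List.slice s none (some (k : Int)))).getD 0, body)
       else (1, s)) := by
  induction rest generalizing pre with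
  | nil =>
    have hd : pre.dropWhile PySem.Chars.isdigit = [] := by
      simp [List.dropWhile_eq_nil_iff]; exact hall
    simp [pvScanA, hd]
  | cons c r ih =>
    have hdp : pre.dropWhile PySem.Chars.isdigit = [] := by
      simp [List.dropWhile_eq_nil_iff]; exact hall
    by_cases hc : PySem.Chars.isdigit c = false
    · have hd : (pre ++ c :: r).dropWhile PySem.Chars.isdigit = c :: r := by
        rw [List.dropWhile_append, hdp]
        simp [hc]
      have hlen : 0 < pre.length := List.length_pos_iff.mpr hpre
      simp only [pvScanA, hc, if_true, hd]
      rw [PySem.List.slice_to _ (by positivity), PySem.List.slice_from _ (by positivity)]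
      have hk : (pre ++ c :: r).length - (c :: r).length = pre.length := by
        simp
      rw [hk]
      have hcond : 0 < pre.length ∧ pre.length < (pre ++ c :: r).length := by
        constructor
        · exact hlen
        · simp
      simp only [hcond, and_self, if_true, Int.toNat_natCast]
      simp
    · have hc' : PySem.Chars.isdigit c = true := by
        revert hc; cases PySem.Chars.isdigit c <;> simp
      have hassoc : pre ++ c :: r = (pre ++ [c]) ++ r := by simp
      have step : pvScanA (pre ++ c :: r) pre.length (c :: r)
          = pvScanA ((pre ++ [c]) ++ r) (pre ++ [c]).length r := by
        simp only [pvScanA, hc']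
        simp
      rw [step, ih (pre ++ [c])
        (by intro x hx; rcases List.mem_append.mp hx with h | h
            · exact hall x h
            · simp at h; subst h; exact hc')
        (by simp)]
      rw [← hassoc]

theorem pvSpecies_eq (sp : List Char) (h : PySem.Chars.strip sp ≠ []) :
    pvSpeciesA sp = pvSpeciesB sp := by
  unfold pvSpeciesA pvSpeciesB
  cases hs : PySem.Chars.strip sp with
  | nil => exact absurd hs h
  | cons c t =>
    have hget : PySem.List.pyGet? (c :: t) 0 = some c := by
      simp [PySem.List.pyGet?, PySem.List.pyIdx?]
    have hj : pvRunB 0 (c :: t) = ((c :: t).takeWhile PySem.Chars.isdigit).length := by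
      simpa using pvRunB_eq (c :: t) 0
    have hdrop : (c :: t).drop ((c :: t).takeWhile PySem.Chars.isdigit).length
        = (c :: t).dropWhile PySem.Chars.isdigit := by
      have h0 := List.drop_left (l₁ := (c :: t).takeWhile PySem.Chars.isdigit)
        (l₂ := (c :: t).dropWhile PySem.Chars.isdigit)
      rwa [List.takeWhile_append_dropWhile] at h0
    have hlen := congrArg List.length
      (List.takeWhile_append_dropWhile (p := PySem.Chars.isdigit) (l := c :: t))
    rw [List.length_append] at hlen
    have hk : (c :: t).length - ((c :: t).dropWhile PySem.Chars.isdigit).length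
        = ((c :: t).takeWhile PySem.Chars.isdigit).length := by omega
    have hslice : PySem.List.slice (c :: t)
        (some ((((c :: t).takeWhile PySem.Chars.isdigit).length : Nat) : Int)) none
        = (c :: t).dropWhile PySem.Chars.isdigit := by
      rw [PySem.List.slice_from _ (by positivity), Int.toNat_natCast, hdrop]
    simp only [hget, hj]
    by_cases hc : PySem.Chars.isdigit c = true
    · simp only [hc, if_true]
      have := pvScanA_eq t [c] (by simpa using hc) (by simp)
      simp only [List.length_cons, List.length_nil] at this
      have h1 : ([c] : List Char) ++ t = c :: t := by simp
      rw [h1] at this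
      have h2 : pvScanA (c :: t) 0 (c :: t) = pvScanA (c :: t) 1 t := by
        simp [pvScanA, hc]
      rw [h2, this]
      simp only [hk, hslice]
      split_ifs with hcond
      · rfl
      · rfl
    · have hc' : PySem.Chars.isdigit c = false := by
        revert hc; cases PySem.Chars.isdigit c <;> simp
      have htw : (c :: t).takeWhile PySem.Chars.isdigit = [] := by
        simp [List.takeWhile_cons_of_neg (by simpa using hc')]
      simp [hc', htw]

-- ===== VERDICT (by name: the statement is the Claim_ definition above) =====
theorem parse_reaction_spec : Claim_equal_parse_reaction := by
  intro reaction _ hpre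
  unfold Spec_parse_reaction parse_reaction parse_reaction_alt pvParseSpeciesA
  obtain ⟨hlen, hsp⟩ := hpre
  obtain ⟨a, b, hab⟩ := List.length_eq_two.mp hlen
  rw [pvTokB_eq, splitOn_eq_pvSplit ['-','>'] pvArrow_ne] at *
  rw [hab]
  simp only [List.map_cons, List.map_nil, List.getElem?_cons_zero, List.getElem?_cons_succ,
    Option.getD_some, PySem.List.foldl_append_singleton_eq_map, List.nil_append]
  rw [← splitOn_eq_pvSplit ['+'] pvPlus_ne a, ← splitOn_eq_pvSplit ['+'] pvPlus_ne b]
  congr 1 <;>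
  · apply List.map_congr_left
    intro sp hmem
    exact pvSpecies_eq sp (by
      first
      | exact hsp a (by simp [hab]) sp hmem
      | exact hsp b (by simp [hab]) sp hmem)
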